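-- pv_equiv track=rewrite | github.com/jannikmi/timezonefinder | scripts/shortcuts.py | has_coherent_sequences
-- ===== SOURCE A (Python) =====
-- from typing import Dict, List, Set, Tuple, Union
--
-- def has_coherent_sequences(lst: List[int]) -> bool:
--     """
--     :return: True if equal entries in the list are not separated by entries of other values
--     """
--     if len(lst) <= 1:
--         return True
--     encountered = set()
--     # at least 2 entries
--     lst_iter = iter(lst)
--     prev = next(lst_iter)
--     for e in lst:
--         if e in encountered:
--             # the entry appeared earlier already
--             return False
--         if e != prev:
--             encountered.add(prev)
--             prev = e
--
--     return True
-- ===== SOURCE B (Python) =====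
-- def has_coherent_sequences(lst):
--     """
--     :return: True if equal entries in the list are not separated by entries of other values
--     """
--     # counting argument: every distinct value occupies at least one maximal run,
--     # and the list is coherent exactly when each value occupies exactly one,
--     # i.e. when the number of runs equals the number of distinct values.
--     if not lst:
--         return True
--     runs = 1 + sum(a != b for a, b in zip(lst, lst[1:]))
--     return len(set(lst)) == runs
-- ===== Notes on version B (the rewrite author's own statement) =====
-- stated objective: alternative
-- what changed: Replaces A's streaming scan (closed-value set, prev tracking, early exit) by a counting identity: the list is coherent iff the number of maximal runs (1 + count of adjacent unequal pairs) equals the number of distinct values, so B just compares two global counts.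
import Mathlib
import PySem

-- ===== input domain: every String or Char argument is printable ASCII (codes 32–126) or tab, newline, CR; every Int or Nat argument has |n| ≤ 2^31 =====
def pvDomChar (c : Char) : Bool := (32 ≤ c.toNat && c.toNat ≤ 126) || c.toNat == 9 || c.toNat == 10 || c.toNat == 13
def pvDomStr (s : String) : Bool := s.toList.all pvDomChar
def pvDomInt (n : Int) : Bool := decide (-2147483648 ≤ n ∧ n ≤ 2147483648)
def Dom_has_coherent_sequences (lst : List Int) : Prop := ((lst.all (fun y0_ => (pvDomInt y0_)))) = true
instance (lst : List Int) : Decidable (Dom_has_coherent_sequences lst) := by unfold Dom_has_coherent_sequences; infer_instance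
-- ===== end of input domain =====

-- B replaces A's streaming closed-value-set scan by a counting identity (#maximal runs = #distinct values); same return value, same O(n) cost.

-- ===== PORT A =====
-- the 'for e in lst' loop: state = (encountered, prev); early return False becomes the 'false' branch
def pvLoopA (enc : PySem.Set Int) (prev : Int) : List Int → Bool
  | [] => true
  | e :: rest =>
    if e ∈ enc then false
    else if e ≠ prev then pvLoopA (PySem.Set.add enc prev) e rest
    else pvLoopA enc prev rest

def has_coherent_sequences (lst : List Int) : Bool :=
  if lst.length ≤ 1 then true
  else
    match lst with
    | [] => true  -- unreachable: length ≥ 2 here (Python's next(lst_iter) cannot raise)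
    | h :: _ => pvLoopA PySem.Set.empty h lst  -- prev = next(iter(lst)); the for loop runs over all of lst

-- ===== PORT B =====
def has_coherent_sequences_alt (lst : List Int) : Bool :=
  match lst with
  | [] => true  -- 'if not lst: return True'
  | _ :: _ =>
    -- runs = 1 + sum(a != b for a, b in zip(lst, lst[1:]))
    let runs : Nat := 1 + ((lst.zip (lst.drop 1)).countP (fun p => p.1 != p.2))
    -- len(set(lst)) == runs
    (PySem.Set.ofList lst).length == runs

-- ===== PRECONDITION & SPEC =====
def Spec_has_coherent_sequences (lst : List Int) (out : Bool) : Prop := out = has_coherent_sequences_alt lst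
instance (lst : List Int) (out : Bool) : Decidable (Spec_has_coherent_sequences lst out) := by unfold Spec_has_coherent_sequences; infer_instance

-- ===== CLAIM (what is proved, stated in full; the proofs are below) =====
def Claim_equal_has_coherent_sequences : Prop := ∀ (lst : List Int), Dom_has_coherent_sequences lst → Spec_has_coherent_sequences lst (has_coherent_sequences lst)

-- ===== LEMMAS AND PROOFS =====

-- run heads of `rest` after a run of value `prev` (the compressed tail); proof-only device
def pvComp (prev : Int) : List Int → List Int
  | [] => []
  | e :: rest => if e ≠ prev then e :: pvComp e rest else pvComp prev rest

-- A's loop decides Nodup of (prev :: pvComp prev rest) plus disjointness from enc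
theorem pvLoopA_iff (rest : List Int) (enc : PySem.Set Int) (prev : Int) (hp : prev ∉ enc) :
    pvLoopA enc prev rest = true ↔
      ((prev :: pvComp prev rest).Nodup ∧ ∀ x ∈ pvComp prev rest, x ∉ enc) := by
  induction rest generalizing enc prev with
  | nil => simp [pvLoopA, pvComp]
  | cons e rest ih =>
    by_cases he : e ∈ enc
    · have hne : e ≠ prev := fun h => hp (h ▸ he)
      have hA : pvLoopA enc prev (e :: rest) = false := by simp [pvLoopA, he]
      rw [hA]
      constructor
      · intro h; cases h
      · rintro ⟨_, hmem⟩
        exact absurd he (hmem e (by simp [pvComp, hne]))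
    · by_cases hep : e = prev
      · subst hep
        have hA : pvLoopA enc e (e :: rest) = pvLoopA enc e rest := by simp [pvLoopA, he]
        have hC : pvComp e (e :: rest) = pvComp e rest := by simp [pvComp]
        rw [hA, hC]
        exact ih enc e hp
      · have he' : e ∉ PySem.Set.add enc prev := by
          simp [PySem.Set.mem_add, he, hep]
        have hA : pvLoopA enc prev (e :: rest) = pvLoopA (PySem.Set.add enc prev) e rest := by
          simp [pvLoopA, he, hep]
        have hC : pvComp prev (e :: rest) = e :: pvComp e rest := by simp [pvComp, hep]
        rw [hA, hC, ih (PySem.Set.add enc prev) e he']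
        constructor
        · rintro ⟨hnd, hmem⟩
          have hmem' : ∀ x ∈ pvComp e rest, x ∉ enc ∧ x ≠ prev := by
            intro x hx
            have := hmem x hx
            simp [PySem.Set.mem_add] at this
            exact this
          refine ⟨?_, ?_⟩
          · simp only [List.nodup_cons] at hnd ⊢
            refine ⟨?_, hnd⟩
            simp only [List.mem_cons, not_or]
            exact ⟨Ne.symm hep, fun h => (hmem' prev h).2 rfl⟩
          · intro x hx
            rcases List.mem_cons.mp hx with h | h
            · exact h ▸ he
            · exact (hmem' x h).1
        · rintro ⟨hnd, hmem⟩
          simp only [List.nodup_cons, List.mem_cons, not_or] at hnd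
          refine ⟨List.nodup_cons.mpr hnd.2, ?_⟩
          intro x hx
          simp only [PySem.Set.mem_add, not_or]
          exact ⟨hmem x (List.mem_cons_of_mem _ hx), fun h => hnd.1.2 (h ▸ hx)⟩

-- the compressed tail counts the adjacent unequal pairs of prev :: rest
theorem pvComp_length (prev : Int) (rest : List Int) :
    (pvComp prev rest).length = ((prev :: rest).zip rest).countP (fun p => p.1 != p.2) := by
  induction rest generalizing prev with
  | nil => rfl
  | cons e rest ih =>
    show (pvComp prev (e :: rest)).length
        = List.countP _ ((prev, e) :: (e :: rest).zip rest)
    by_cases h : e = prev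
    · subst h
      simp [pvComp, ih e]
    · simp [pvComp, h, ih e, bne_iff_ne, Ne.symm h]

-- compression does not change membership (away from the pending run value)
theorem pvComp_mem (a prev : Int) (h : a ≠ prev) (l : List Int) :
    a ∈ pvComp prev l ↔ a ∈ l := by
  induction l generalizing prev with
  | nil => simp [pvComp]
  | cons e rest ih =>
    by_cases he : e = prev
    · subst he
      have : pvComp e (e :: rest) = pvComp e rest := by simp [pvComp]
      rw [this, ih e h]
      simp [List.mem_cons]
      intro hae; exact absurd hae h
    · have : pvComp prev (e :: rest) = e :: pvComp e rest := by simp [pvComp, he]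
      rw [this]
      by_cases hae : a = e
      · subst hae; simp
      · simp [List.mem_cons, hae, ih e hae]

theorem pvComp_toFinset (h : Int) (t : List Int) :
    (h :: pvComp h t).toFinset = (h :: t).toFinset := by
  apply Finset.ext
  intro a
  simp only [List.mem_toFinset, List.mem_cons]
  by_cases hah : a = h
  · simp [hah]
  · simp [hah, pvComp_mem a h hah t]

-- len(set(l)) is the number of distinct values
theorem pvOfList_length (l : List Int) :
    (PySem.Set.ofList l).length = l.toFinset.card := by
  have hnd : (PySem.Set.ofList l).Nodup := PySem.Set.nodup_ofList l
  have hfs : (PySem.Set.ofList l).toFinset = l.toFinset := by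
    apply Finset.ext
    intro a
    simp [List.mem_toFinset, PySem.Set.mem_ofList]
  rw [← hfs, List.toFinset_card_of_nodup hnd]

-- card = length ↔ Nodup, list form
theorem pvCard_eq_iff (l : List Int) : l.toFinset.card = l.length ↔ l.Nodup := by
  rw [List.card_toFinset]
  constructor
  · intro h
    exact List.dedup_eq_self.mp ((l.dedup_sublist).eq_of_length h)
  · intro h
    rw [List.dedup_eq_self.mpr h]

-- B decides Nodup of the run-head sequence
theorem pvAlt_iff (h : Int) (t : List Int) :
    has_coherent_sequences_alt (h :: t) = true ↔ (h :: pvComp h t).Nodup := by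
  show ((PySem.Set.ofList (h :: t)).length
      == 1 + (((h :: t).zip ((h :: t).drop 1)).countP (fun p => p.1 != p.2))) = true ↔ _
  rw [beq_iff_eq, pvOfList_length]
  have hz : ((h :: t).zip ((h :: t).drop 1)) = (h :: t).zip t := by simp
  rw [hz, ← pvComp_length h t]
  have hlen : 1 + (pvComp h t).length = (h :: pvComp h t).length := by
    simp [Nat.add_comm]
  rw [hlen]
  have hfs := pvComp_toFinset h t
  constructor
  · intro hc
    exact (pvCard_eq_iff _).mp (by rw [hfs]; exact hc)
  · intro hnd
    rw [← hfs]
    exact (pvCard_eq_iff _).mpr hnd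

-- ===== VERDICT (by name: the statement is the Claim_ definition above) =====
theorem has_coherent_sequences_spec : Claim_equal_has_coherent_sequences := by
  intro lst _
  unfold Spec_has_coherent_sequences
  match lst with
  | [] => decide
  | [a] =>
    have hA : has_coherent_sequences [a] = true := by simp [has_coherent_sequences]
    have hB : has_coherent_sequences_alt [a] = true := by
      rw [pvAlt_iff]; simp [pvComp]
    rw [hA, hB]
  | a :: b :: rest =>
    have hA : has_coherent_sequences (a :: b :: rest) = pvLoopA PySem.Set.empty a (a :: b :: rest) := by
      simp [has_coherent_sequences]
    have hloop : pvLoopA PySem.Set.empty a (a :: b :: rest) = true ↔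
        ((a :: pvComp a (b :: rest)).Nodup ∧ ∀ x ∈ pvComp a (b :: rest), x ∉ (PySem.Set.empty : PySem.Set Int)) := by
      have h0 : pvLoopA PySem.Set.empty a (a :: b :: rest)
          = pvLoopA PySem.Set.empty a (b :: rest) := by
        simp [pvLoopA, PySem.Set.empty]
      rw [h0]
      exact pvLoopA_iff (b :: rest) PySem.Set.empty a (by simp [PySem.Set.empty])
    have hiff : pvLoopA PySem.Set.empty a (a :: b :: rest) = true ↔
        has_coherent_sequences_alt (a :: b :: rest) = true := by
      rw [hloop, pvAlt_iff]
      constructor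
      · exact fun h => h.1
      · exact fun h => ⟨h, by simp [PySem.Set.empty]⟩
    rw [hA]
    by_cases hb : has_coherent_sequences_alt (a :: b :: rest) = true
    · rw [hb, hiff.mpr hb]
    · have h1 : pvLoopA PySem.Set.empty a (a :: b :: rest) = false := by
        cases hx : pvLoopA PySem.Set.empty a (a :: b :: rest) with
        | false => rfl
        | true => exact absurd (hiff.mp hx) hb
      have h2 : has_coherent_sequences_alt (a :: b :: rest) = false := by
        cases hx : has_coherent_sequences_alt (a :: b :: rest) with
        | false => rfl
        | true => exact absurd hx hb
      rw [h1, h2]
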